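-- pv_equiv track=rewrite | github.com/ioaksenenko/neural_networks | 2_untagging_submasks_maker/datamaker/type_3/main.py | number_input_question_generate
-- ===== SOURCE A (Python) =====
-- def number_input_question_generate(n=1, m=1):
--     inputs = []
--     outputs = []
--     input = '<p>T</p>'
--     output = ['___T____']
--     for _ in range(2 * n):
--         output.append('________')
--     for i in range(n):
--         input += '<p><b><u>T</u></b></p>' + '<p>T</p>'
--         output[0] += '______________________' + '________'
--         for j in range(n):
--             if j == i:
--                 output[2 * j + 1] += '___<b><u>T</u></b>____' + '________'
--                 output[2 * j + 2] += '______________________' + '___T____'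
--             else:
--                 output[2 * j + 1] += '______________________' + '________'
--                 output[2 * j + 2] += '______________________' + '________'
--     inputs.append(input)
--     outputs.append(output)
--     inputs.append(input[0:len(input) - 8])
--     outputs.append([el[:len(el) - 8] for el in output][:len(output) - 1])
--     return inputs, outputs
-- ===== SOURCE B (Python) =====
-- def number_input_question_generate(n=1, m=1):
--     FILLER = '______________________' + '________'
--     input_ = '<p>T</p>' + ('<p><b><u>T</u></b></p>' + '<p>T</p>') * n
--     output = ['___T____' + FILLER * n]
--     for j in range(n):
--         output.append('________' + FILLER * j
--                       + ('___<b><u>T</u></b>____' + '________')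
--                       + FILLER * (n - 1 - j))
--         output.append('________' + FILLER * j
--                       + ('______________________' + '___T____')
--                       + FILLER * (n - 1 - j))
--     inputs = [input_, input_[0:len(input_) - 8]]
--     outputs = [output, [el[:len(el) - 8] for el in output[:len(output) - 1]]]
--     return inputs, outputs
-- ===== Notes on version B (the rewrite author's own statement) =====
-- stated objective: faster
-- what changed: Each output row is built in one shot by a closed-form formula (prefix + FILLER*j + marked block + FILLER*(n-1-j)) and the input by string multiplication, replacing A's 2n+1 strings grown 30 chars at a time inside an n-by-n nested loop with per-cell list indexing.
import Mathlib
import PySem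

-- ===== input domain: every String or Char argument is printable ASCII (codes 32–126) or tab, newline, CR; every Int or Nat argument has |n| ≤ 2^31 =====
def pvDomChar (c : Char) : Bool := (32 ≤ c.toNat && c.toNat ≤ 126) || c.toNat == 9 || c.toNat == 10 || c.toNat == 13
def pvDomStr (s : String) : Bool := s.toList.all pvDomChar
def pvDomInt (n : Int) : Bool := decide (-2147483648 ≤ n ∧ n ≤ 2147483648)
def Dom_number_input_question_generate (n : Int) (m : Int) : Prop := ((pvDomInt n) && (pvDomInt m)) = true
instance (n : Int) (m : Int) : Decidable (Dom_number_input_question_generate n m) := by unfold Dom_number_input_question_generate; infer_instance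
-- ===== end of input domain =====

-- B builds every row of the output in one shot from a closed-form formula instead of
-- growing 2n+1 strings cell by cell inside A's n-by-n nested loop (objective: faster).

-- ===== PORT A =====
-- literal port of A; the two nested 'for' loops are folds over pyRange carrying the same
-- (input, output) state; indexed updates 'output[k] += s' via pyGetD/pySetD (always in range).
def pvInnerBody (i : Int) (out : List String) (j : Int) : List String :=
  if j == i then
    let out := PySem.List.pySetD out (2 * j + 1)
      (PySem.List.pyGetD out (2 * j + 1) "" ++ ("___<b><u>T</u></b>____" ++ "________"))
    PySem.List.pySetD out (2 * j + 2)
      (PySem.List.pyGetD out (2 * j + 2) "" ++ ("______________________" ++ "___T____"))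
  else
    let out := PySem.List.pySetD out (2 * j + 1)
      (PySem.List.pyGetD out (2 * j + 1) "" ++ ("______________________" ++ "________"))
    PySem.List.pySetD out (2 * j + 2)
      (PySem.List.pyGetD out (2 * j + 2) "" ++ ("______________________" ++ "________"))

def pvOuterBody (n : Int) (st : String × List String) (i : Int) : String × List String :=
  let input := st.1 ++ ("<p><b><u>T</u></b></p>" ++ "<p>T</p>")
  let out := PySem.List.pySetD st.2 0
    (PySem.List.pyGetD st.2 0 "" ++ ("______________________" ++ "________"))
  let out := (PySem.List.pyRange 0 n 1).foldl (pvInnerBody i) out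
  (input, out)

def number_input_question_generate (n : Int) (m : Int) : List String × List (List String) :=
  let input0 : String := "<p>T</p>"
  let output0 : List String := ["___T____"]
  let output1 : List String :=
    (PySem.List.pyRange 0 (2 * n) 1).foldl (fun acc _ => acc ++ ["________"]) output0
  let st := (PySem.List.pyRange 0 n 1).foldl (pvOuterBody n) (input0, output1)
  let input := st.1
  let output := st.2
  let inputs : List String :=
    [input, PySem.Str.slice input (some 0) (some (PySem.Str.len input - 8))]
  let outputs : List (List String) :=
    [output,
     PySem.List.slice (output.map (fun el => PySem.Str.slice el none (some (PySem.Str.len el - 8))))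
       none (some (PySem.List.len output - 1))]
  (inputs, outputs)

-- ===== PORT B =====
-- hand port of Python's  s * k  on strings (PySem's pyRepeat covers lists only):
-- exact for every Int k — a negative or zero k gives "", as in Python.
def pvStrMulNat (s : String) : Nat → String
  | 0 => ""
  | k + 1 => pvStrMulNat s k ++ s

def pvStrMul (s : String) (k : Int) : String := pvStrMulNat s k.toNat

-- the two rows B appends for index j (closed forms)
def pvAltRows (n j : Int) : List String :=
  let FILLER : String := "______________________" ++ "________"
  ["________" ++ pvStrMul FILLER j ++ ("___<b><u>T</u></b>____" ++ "________") ++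
     pvStrMul FILLER (n - 1 - j),
   "________" ++ pvStrMul FILLER j ++ ("______________________" ++ "___T____") ++
     pvStrMul FILLER (n - 1 - j)]

def number_input_question_generate_alt (n : Int) (m : Int) : List String × List (List String) :=
  let FILLER : String := "______________________" ++ "________"
  let input : String := "<p>T</p>" ++ pvStrMul ("<p><b><u>T</u></b></p>" ++ "<p>T</p>") n
  let output : List String :=
    ("___T____" ++ pvStrMul FILLER n) ::
      (PySem.List.pyRange 0 n 1).foldl (fun acc j => acc ++ pvAltRows n j) []
  let inputs : List String :=
    [input, PySem.Str.slice input (some 0) (some (PySem.Str.len input - 8))]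
  let outputs : List (List String) :=
    [output,
     (PySem.List.slice output none (some (PySem.List.len output - 1))).map
       (fun el => PySem.Str.slice el none (some (PySem.Str.len el - 8)))]
  (inputs, outputs)

-- ===== PRECONDITION & SPEC =====
def Spec_number_input_question_generate (n : Int) (m : Int) (out : List String × List (List String)) : Prop := out = number_input_question_generate_alt n m
instance (n : Int) (m : Int) (out : List String × List (List String)) : Decidable (Spec_number_input_question_generate n m out) := by unfold Spec_number_input_question_generate; infer_instance

-- ===== CLAIM (what is proved, stated in full; the proofs are below) =====
def Claim_equal_number_input_question_generate : Prop := ∀ (n : Int) (m : Int), Dom_number_input_question_generate n m → Spec_number_input_question_generate n m (number_input_question_generate n m)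

-- ===== LEMMAS AND PROOFS =====

-- the literal blocks
def pvF : String := "______________________" ++ "________"
def pvP : String := "<p><b><u>T</u></b></p>" ++ "<p>T</p>"

-- closed form of row 2j+1 (pvRowA) / row 2j+2 (pvRowB) after t outer iterations
def pvRowA (t j : Nat) : String :=
  if j < t then "________" ++ pvStrMulNat pvF j ++ ("___<b><u>T</u></b>____" ++ "________") ++
      pvStrMulNat pvF (t - 1 - j)
  else "________" ++ pvStrMulNat pvF t

def pvRowB (t j : Nat) : String :=
  if j < t then "________" ++ pvStrMulNat pvF j ++ ("______________________" ++ "___T____") ++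
      pvStrMulNat pvF (t - 1 - j)
  else "________" ++ pvStrMulNat pvF t

-- the tail of the output list as pairs of rows, generated from g
def pvPairs (g : Nat → String × String) : Nat → List String
  | 0 => []
  | N + 1 => pvPairs g N ++ [(g N).1, (g N).2]

-- inner-loop intermediate state: first T pairs already carry iteration t's contribution
def pvMid (t T j : Nat) : String × String :=
  if j < T then (pvRowA (t + 1) j, pvRowB (t + 1) j) else (pvRowA t j, pvRowB t j)

lemma pvPairs_length (g : Nat → String × String) (N : Nat) : (pvPairs g N).length = 2 * N := by
  induction N with
  | zero => rfl
  | succ N ih => simp [pvPairs, ih]; omega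

lemma pvPairs_congr (g g' : Nat → String × String) (N : Nat) (h : ∀ j < N, g j = g' j) :
    pvPairs g N = pvPairs g' N := by
  induction N with
  | zero => rfl
  | succ N ih =>
    simp [pvPairs, ih (fun j hj => h j (by omega)), h N (by omega)]

lemma pvPairs_getD_fst (g : Nat → String × String) (N j : Nat) (d : String) (h : j < N) :
    (pvPairs g N).getD (2 * j) d = (g j).1 := by
  induction N with
  | zero => omega
  | succ N ih =>
    rcases Nat.lt_or_ge j N with hj | hj
    · rw [pvPairs, List.getD_append _ _ _ _ (by simp [pvPairs_length]; omega), ih hj]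
    · have : j = N := by omega
      subst this
      rw [pvPairs, List.getD_append_right _ _ _ _ (by simp [pvPairs_length])]
      simp [pvPairs_length]

lemma pvPairs_getD_snd (g : Nat → String × String) (N j : Nat) (d : String) (h : j < N) :
    (pvPairs g N).getD (2 * j + 1) d = (g j).2 := by
  induction N with
  | zero => omega
  | succ N ih =>
    rcases Nat.lt_or_ge j N with hj | hj
    · rw [pvPairs, List.getD_append _ _ _ _ (by simp [pvPairs_length]; omega), ih hj]
    · have : j = N := by omega
      subst this
      rw [pvPairs, List.getD_append_right _ _ _ _ (by simp [pvPairs_length])]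
      simp only [pvPairs_length]
      have h1 : 2 * j + 1 - 2 * j = 1 := by omega
      rw [h1]; rfl

lemma pvPairs_set_fst (g : Nat → String × String) (N j : Nat) (x : String) (h : j < N) :
    (pvPairs g N).set (2 * j) x = pvPairs (fun k => if k = j then (x, (g k).2) else g k) N := by
  induction N with
  | zero => omega
  | succ N ih =>
    rcases Nat.lt_or_ge j N with hj | hj
    · rw [pvPairs, List.set_append, if_pos (by simp [pvPairs_length]; omega), ih hj, pvPairs]
      simp [(Nat.ne_of_lt hj).symm]
    · have : j = N := by omega
      subst this
      rw [pvPairs, List.set_append, if_neg (by simp [pvPairs_length]), pvPairs_length, pvPairs]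
      have h1 : 2 * j - 2 * j = 0 := by omega
      rw [h1]
      simp
      exact pvPairs_congr _ _ _ (fun k hk => by simp [Nat.ne_of_lt hk])

lemma pvPairs_set_snd (g : Nat → String × String) (N j : Nat) (x : String) (h : j < N) :
    (pvPairs g N).set (2 * j + 1) x = pvPairs (fun k => if k = j then ((g k).1, x) else g k) N := by
  induction N with
  | zero => omega
  | succ N ih =>
    rcases Nat.lt_or_ge j N with hj | hj
    · rw [pvPairs, List.set_append, if_pos (by simp [pvPairs_length]; omega), ih hj, pvPairs]
      simp [(Nat.ne_of_lt hj).symm]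
    · have : j = N := by omega
      subst this
      rw [pvPairs, List.set_append, if_neg (by simp [pvPairs_length]), pvPairs_length, pvPairs]
      have h1 : 2 * j + 1 - 2 * j = 1 := by omega
      rw [h1]
      simp
      exact pvPairs_congr _ _ _ (fun k hk => by simp [Nat.ne_of_lt hk])

lemma pvSetD_natCast {α : Type} (xs : List α) (k : Nat) (v : α) (h : k < xs.length) :
    PySem.List.pySetD xs (k : Int) v = xs.set k v := by
  simp [PySem.List.pySetD, PySem.List.pySet?, PySem.List.pyIdx?, h]

lemma pvRowA_self (t : Nat) :
    pvRowA t t ++ ("___<b><u>T</u></b>____" ++ "________") = pvRowA (t + 1) t := by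
  simp [pvRowA, pvStrMulNat, String.append_assoc, String.append_empty]

lemma pvRowB_self (t : Nat) :
    pvRowB t t ++ ("______________________" ++ "___T____") = pvRowB (t + 1) t := by
  simp [pvRowB, pvStrMulNat, String.append_assoc, String.append_empty]

lemma pvRowA_step (t j : Nat) (h : j ≠ t) : pvRowA t j ++ pvF = pvRowA (t + 1) j := by
  rcases Nat.lt_or_ge j t with hj | hj
  · have h1 : t - j = (t - 1 - j) + 1 := by omega
    simp [pvRowA, hj, Nat.lt_succ_of_lt hj, h1, pvStrMulNat,
      String.append_assoc]
  · have hj' : ¬ j < t := by omega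
    have hj'' : ¬ j < t + 1 := by omega
    simp [pvRowA, hj', hj'', pvStrMulNat, String.append_assoc]

lemma pvRowB_step (t j : Nat) (h : j ≠ t) : pvRowB t j ++ pvF = pvRowB (t + 1) j := by
  rcases Nat.lt_or_ge j t with hj | hj
  · have h1 : t - j = (t - 1 - j) + 1 := by omega
    simp [pvRowB, hj, Nat.lt_succ_of_lt hj, h1, pvStrMulNat,
      String.append_assoc]
  · have hj' : ¬ j < t := by omega
    have hj'' : ¬ j < t + 1 := by omega
    simp [pvRowB, hj', hj'', pvStrMulNat, String.append_assoc]

lemma pvLen_cons_pairs (h0 : String) (g : Nat → String × String) (N : Nat) :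
    (h0 :: pvPairs g N).length = 2 * N + 1 := by
  simp [pvPairs_length]

lemma pvUpd_fst (h0 : String) (g : Nat → String × String) (N j : Nat) (h : j < N)
    (s : String) :
    PySem.List.pySetD (h0 :: pvPairs g N) ((2 * j + 1 : Nat) : Int)
        (PySem.List.pyGetD (h0 :: pvPairs g N) ((2 * j + 1 : Nat) : Int) "" ++ s) =
      h0 :: pvPairs (fun k => if k = j then ((g k).1 ++ s, (g k).2) else g k) N := by
  rw [PySem.List.pyGetD_natCast, List.getD_cons_succ, pvPairs_getD_fst _ _ _ _ h]
  rw [pvSetD_natCast _ _ _ (by rw [pvLen_cons_pairs]; omega), List.set_cons_succ,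
    pvPairs_set_fst _ _ _ _ h]
  congr 1
  apply pvPairs_congr
  intro k hk
  by_cases hkj : k = j
  · subst hkj; simp
  · simp [hkj]

lemma pvUpd_snd (h0 : String) (g : Nat → String × String) (N j : Nat) (h : j < N)
    (s : String) :
    PySem.List.pySetD (h0 :: pvPairs g N) ((2 * j + 2 : Nat) : Int)
        (PySem.List.pyGetD (h0 :: pvPairs g N) ((2 * j + 2 : Nat) : Int) "" ++ s) =
      h0 :: pvPairs (fun k => if k = j then ((g k).1, (g k).2 ++ s) else g k) N := by
  have e : (2 * j + 2 : Nat) = (2 * j + 1) + 1 := by omega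
  rw [e, PySem.List.pyGetD_natCast, List.getD_cons_succ, pvPairs_getD_snd _ _ _ _ h]
  rw [pvSetD_natCast _ _ _ (by rw [pvLen_cons_pairs]; omega), List.set_cons_succ,
    pvPairs_set_snd _ _ _ _ h]
  congr 1
  apply pvPairs_congr
  intro k hk
  by_cases hkj : k = j
  · subst hkj; simp
  · simp [hkj]

lemma pvInner_step (N t T : Nat) (h0 : String) (hT : T < N) :
    pvInnerBody (t : Int) (h0 :: pvPairs (pvMid t T) N) (T : Int) =
      h0 :: pvPairs (pvMid t (T + 1)) N := by
  have e1 : (2 * (T : Int) + 1) = ((2 * T + 1 : Nat) : Int) := by push_cast; ring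
  have e2 : (2 * (T : Int) + 2) = ((2 * T + 2 : Nat) : Int) := by push_cast; ring
  by_cases hTt : T = t
  · subst hTt
    rw [pvInnerBody, if_pos (by simp), e1, e2]
    rw [pvUpd_fst _ _ _ _ hT, pvUpd_snd _ _ _ _ hT]
    congr 1
    apply pvPairs_congr
    intro k hk
    by_cases hkT : k = T
    · subst hkT
      simp only [pvMid, if_neg (Nat.lt_irrefl k), if_pos (Nat.lt_succ_self k)]
      exact Prod.ext (pvRowA_self k) (pvRowB_self k)
    · simp only [if_neg hkT, pvMid]
      rcases Nat.lt_or_ge k T with hk1 | hk1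
      · simp [hk1, Nat.lt_succ_of_lt hk1]
      · have hk2 : ¬ k < T := by omega
        have hk3 : ¬ k < T + 1 := by omega
        simp [hk2, hk3]
  · rw [pvInnerBody, if_neg (by simpa using fun h => hTt (by exact_mod_cast h)), e1, e2]
    rw [pvUpd_fst _ _ _ _ hT, pvUpd_snd _ _ _ _ hT]
    congr 1
    apply pvPairs_congr
    intro k hk
    by_cases hkT : k = T
    · subst hkT
      simp only [pvMid, if_neg (Nat.lt_irrefl k), if_pos (Nat.lt_succ_self k)]
      exact Prod.ext (pvRowA_step _ _ hTt) (pvRowB_step _ _ hTt)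
    · simp only [if_neg hkT, pvMid]
      rcases Nat.lt_or_ge k T with hk1 | hk1
      · simp [hk1, Nat.lt_succ_of_lt hk1]
      · have hk2 : ¬ k < T := by omega
        have hk3 : ¬ k < T + 1 := by omega
        simp [hk2, hk3]


lemma pvInner (N t : Nat) (h0 : String) :
    ∀ T, T ≤ N →
      (PySem.List.pyRange 0 (T : Int) 1).foldl (pvInnerBody (t : Int))
        (h0 :: pvPairs (pvMid t 0) N) = h0 :: pvPairs (pvMid t T) N := by
  intro T
  induction T with
  | zero =>
    intro _
    rw [PySem.List.pyRange_one_eq_nil (by norm_num)]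
    rfl
  | succ T ih =>
    intro hT
    have e : ((T + 1 : Nat) : Int) = (T : Int) + 1 := by push_cast; ring
    rw [e, PySem.List.pyRange_one_succ_right (by positivity), List.foldl_append,
      ih (by omega)]
    simpa using pvInner_step N t T h0 (by omega)

lemma pvMid_zero (t : Nat) : pvMid t 0 = fun j => (pvRowA t j, pvRowB t j) := by
  funext j; simp [pvMid]

lemma pvSetD_zero_cons {α : Type} (a : α) (l : List α) (v : α) :
    PySem.List.pySetD (a :: l) 0 v = v :: l := by
  simp [PySem.List.pySetD, PySem.List.pySet?, PySem.List.pyIdx?]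

lemma pvOuter_step (N t : Nat) (s : String) :
    pvOuterBody (N : Int)
        (s, ("___T____" ++ pvStrMulNat pvF t) :: pvPairs (fun j => (pvRowA t j, pvRowB t j)) N)
        (t : Int) =
      (s ++ pvP,
       ("___T____" ++ pvStrMulNat pvF (t + 1)) ::
         pvPairs (fun j => (pvRowA (t + 1) j, pvRowB (t + 1) j)) N) := by
  rw [pvOuterBody]
  rw [PySem.List.pyGetD_zero_cons, pvSetD_zero_cons]
  have hh : ("___T____" ++ pvStrMulNat pvF t) ++ ("______________________" ++ "________") =
      "___T____" ++ pvStrMulNat pvF (t + 1) := by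
    show _ = "___T____" ++ (pvStrMulNat pvF t ++ pvF)
    rw [String.append_assoc]; rfl
  rw [hh, ← pvMid_zero t, pvInner N t _ N le_rfl]
  refine Prod.ext (by simp [pvP]) ?_
  show _ :: _ = _
  congr 1
  apply pvPairs_congr
  intro j hj
  simp [pvMid, hj]

lemma pvOuter (N : Nat) :
    ∀ t ≤ N,
      (PySem.List.pyRange 0 (t : Int) 1).foldl (pvOuterBody (N : Int))
        ("<p>T</p>",
         ("___T____" ++ pvStrMulNat pvF 0) :: pvPairs (fun j => (pvRowA 0 j, pvRowB 0 j)) N) =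
      ("<p>T</p>" ++ pvStrMulNat pvP t,
       ("___T____" ++ pvStrMulNat pvF t) :: pvPairs (fun j => (pvRowA t j, pvRowB t j)) N) := by
  intro t
  induction t with
  | zero =>
    intro _
    rw [PySem.List.pyRange_one_eq_nil (by norm_num)]
    simp [pvStrMulNat]
  | succ t ih =>
    intro ht
    have e : ((t + 1 : Nat) : Int) = (t : Int) + 1 := by push_cast; ring
    rw [e, PySem.List.pyRange_one_succ_right (by positivity), List.foldl_append,
      ih (by omega), List.foldl, List.foldl, pvOuter_step N t]
    refine Prod.ext ?_ rfl
    show ("<p>T</p>" ++ pvStrMulNat pvP t) ++ pvP = "<p>T</p>" ++ (pvStrMulNat pvP t ++ pvP)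
    rw [String.append_assoc]

lemma pvRepl (N : Nat) :
    List.replicate (2 * N) ("________" : String) =
      pvPairs (fun j => (pvRowA 0 j, pvRowB 0 j)) N := by
  induction N with
  | zero => rfl
  | succ N ih =>
    have e : 2 * (N + 1) = 2 * N + 2 := by omega
    rw [e, List.replicate_add, ih, pvPairs]
    simp [pvRowA, pvRowB, pvStrMulNat, List.replicate]

lemma pvStrMul_natCast (s : String) (k : Nat) : pvStrMul s (k : Int) = pvStrMulNat s k := by
  simp [pvStrMul]

lemma pvAltFlat (N : Nat) :
    ∀ T ≤ N,
      (PySem.List.pyRange 0 (T : Int) 1).flatMap (pvAltRows (N : Int)) =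
        pvPairs (fun j => (pvRowA N j, pvRowB N j)) T := by
  intro T
  induction T with
  | zero =>
    intro _
    rw [PySem.List.pyRange_one_eq_nil (by norm_num)]
    rfl
  | succ T ih =>
    intro hT
    have e : ((T + 1 : Nat) : Int) = (T : Int) + 1 := by push_cast; ring
    rw [e, PySem.List.pyRange_one_succ_right (by positivity), List.flatMap_append,
      ih (by omega), pvPairs]
    have e2 : ((N : Int) - 1 - (T : Int)) = ((N - 1 - T : Nat) : Int) := by omega
    simp only [List.flatMap_cons, List.flatMap_nil, List.append_nil, pvAltRows,
      pvStrMul_natCast, e2]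
    have hTN : T < N := by omega
    simp [pvRowA, pvRowB, pvF, hTN]

lemma pvPostlude (l : List String) (f : String → String) :
    PySem.List.slice (l.map f) none (some (PySem.List.len l - 1)) =
      (PySem.List.slice l none (some (PySem.List.len l - 1))).map f := by
  cases l with
  | nil => rfl
  | cons a l =>
    have e : PySem.List.len (a :: l) - 1 = (((a :: l).length - 1 : Nat) : Int) := by
      simp [PySem.List.len_eq]
    rw [e, PySem.List.slice_to_natCast, PySem.List.slice_to_natCast, ← List.map_take]

-- ===== VERDICT (by name: the statement is the Claim_ definition above) =====
theorem number_input_question_generate_spec : Claim_equal_number_input_question_generate := by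
  intro n m _
  unfold Spec_number_input_question_generate
  by_cases hn : 0 ≤ n
  · lift n to Nat using hn with N
    simp only [number_input_question_generate, number_input_question_generate_alt]
    rw [show ((2 : Int) * (N : Int)) = ((2 * N : Nat) : Int) by push_cast; ring]
    rw [PySem.List.foldl_append_singleton_eq_map]
    rw [show (PySem.List.pyRange 0 ((2 * N : Nat) : Int) 1).map (fun _ => ("________" : String)) =
        List.replicate (2 * N) "________" by
      rw [List.map_const', PySem.List.length_pyRange_one,
        show ((2 * N : Nat) : Int) - 0 = ((2 * N : Nat) : Int) by ring, Int.toNat_natCast]]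
    rw [pvRepl, List.singleton_append]
    rw [show ("___T____" : String) :: pvPairs (fun j => (pvRowA 0 j, pvRowB 0 j)) N =
        ("___T____" ++ pvStrMulNat pvF 0) :: pvPairs (fun j => (pvRowA 0 j, pvRowB 0 j)) N by
      rw [show pvStrMulNat pvF 0 = "" from rfl, String.append_empty]]
    rw [pvOuter N N le_rfl]
    rw [PySem.List.foldl_append_eq_flatMap, List.nil_append, pvAltFlat N N le_rfl]
    rw [pvStrMul_natCast, pvStrMul_natCast, pvPostlude]
    rfl
  · have hn' : n < 0 := by omega
    have h2 : (2 : Int) * n ≤ 0 := by omega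
    simp only [number_input_question_generate, number_input_question_generate_alt]
    rw [PySem.List.pyRange_one_eq_nil h2, PySem.List.pyRange_one_eq_nil (le_of_lt hn')]
    have hm : ∀ s : String, pvStrMul s n = "" := by
      intro s
      rw [pvStrMul, Int.toNat_of_nonpos (le_of_lt hn')]; rfl
    rw [hm, hm, String.append_empty, String.append_empty]
    simp only [List.foldl_nil]
    rw [pvPostlude]
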